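-- pv_equiv track=rewrite | github.com/TarnishedMyxa/Assenza2015-ABM-Framework | experiment_utils.py | longest_run_below
-- ===== SOURCE A (Python) =====
-- def longest_run_below(series, threshold):
--     longest = 0
--     current = 0
--     for value in series:
--         if value < threshold:
--             current += 1
--             longest = max(longest, current)
--         else:
--             current = 0
--     return longest
-- ===== SOURCE B (Python) =====
-- def longest_run_below(series, threshold):
--     it = iter(series)
--     best = 0
--     v = next(it, None)
--     while v is not None:
--         if v < threshold:
--             n = 1
--             v = next(it, None)
--             while v is not None and v < threshold:
--                 n += 1
--                 v = next(it, None)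
--             best = max(best, n)
--         else:
--             v = next(it, None)
--     return best
-- ===== Notes on version B (the rewrite author's own statement) =====
-- stated objective: alternative
-- what changed: Replaces the running-counter-with-max single loop by a run-segmentation scan: an inner loop consumes each maximal below-threshold run in one go and the outer loop takes the max of run lengths.
import Mathlib
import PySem

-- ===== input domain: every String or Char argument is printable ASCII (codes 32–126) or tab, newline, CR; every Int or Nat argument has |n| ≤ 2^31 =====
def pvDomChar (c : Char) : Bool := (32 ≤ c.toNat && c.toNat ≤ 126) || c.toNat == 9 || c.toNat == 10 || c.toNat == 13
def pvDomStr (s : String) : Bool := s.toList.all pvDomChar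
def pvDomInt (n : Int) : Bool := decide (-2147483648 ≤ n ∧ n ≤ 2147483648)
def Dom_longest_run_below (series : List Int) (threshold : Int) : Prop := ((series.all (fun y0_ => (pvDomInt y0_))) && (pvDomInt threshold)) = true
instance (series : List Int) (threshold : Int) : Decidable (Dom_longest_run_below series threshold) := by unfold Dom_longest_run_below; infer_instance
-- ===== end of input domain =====

-- B replaces A's running-counter-with-max loop by a run-segmentation scan (inner loop
-- consumes each maximal below-threshold run, outer loop keeps the max of run lengths);
-- objective: alternative (same O(n) cost).

-- ===== PORT A =====
-- state (longest, current), one step per element, exactly A's loop body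
def longest_run_below (series : List Int) (threshold : Int) : Int :=
  (series.foldl
    (fun (s : Int × Int) value =>
      if value < threshold then (max s.1 (s.2 + 1), s.2 + 1) else (s.1, 0))
    (0, 0)).1

-- ===== PORT B =====
-- inner loop of B: consume the leading below-threshold run, returning its
-- length and the remaining list
def lrbRun (threshold : Int) : List Int → Int × List Int
  | [] => (0, [])
  | x :: xs =>
    if x < threshold then
      let p := lrbRun threshold xs
      (p.1 + 1, p.2)
    else (0, x :: xs)

theorem lrbRun_length_le (threshold : Int) (l : List Int) :
    (lrbRun threshold l).2.length ≤ l.length := by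
  induction l with
  | nil => simp [lrbRun]
  | cons x xs ih =>
    simp only [lrbRun]
    split
    · exact le_trans ih (Nat.le_succ _)
    · exact le_refl _

-- outer loop of B: `best` accumulator, a run is consumed whole when its head is seen
def lrbGo (threshold : Int) : List Int → Int → Int
  | [], best => best
  | x :: xs, best =>
    if x < threshold then
      let p := lrbRun threshold xs
      lrbGo threshold p.2 (max best (p.1 + 1))
    else lrbGo threshold xs best
termination_by l _ => l.length
decreasing_by
  · exact Nat.lt_succ_of_le (lrbRun_length_le threshold xs)
  · exact Nat.lt_succ_of_le (le_refl _)

def longest_run_below_alt (series : List Int) (threshold : Int) : Int :=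
  lrbGo threshold series 0

-- ===== PRECONDITION & SPEC =====
def Spec_longest_run_below (series : List Int) (threshold : Int) (out : Int) : Prop := out = longest_run_below_alt series threshold
instance (series : List Int) (threshold : Int) (out : Int) : Decidable (Spec_longest_run_below series threshold out) := by unfold Spec_longest_run_below; infer_instance

-- ===== CLAIM (what is proved, stated in full; the proofs are below) =====
def Claim_equal_longest_run_below : Prop := ∀ (series : List Int) (threshold : Int), Dom_longest_run_below series threshold → Spec_longest_run_below series threshold (longest_run_below series threshold)

-- ===== LEMMAS AND PROOFS =====

theorem lrbRun_nonneg (threshold : Int) (l : List Int) : 0 ≤ (lrbRun threshold l).1 := by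
  induction l with
  | nil => simp [lrbRun]
  | cons x xs ih =>
    simp only [lrbRun]
    split
    · omega
    · simp

theorem lrbGo_ge (threshold : Int) (l : List Int) (best : Int) :
    best ≤ lrbGo threshold l best := by
  fun_induction lrbGo with
  | case1 => exact le_refl _
  | case2 x xs best h p ih => exact le_trans (le_max_left _ _) ih
  | case3 x xs best h ih => exact ih

theorem lrbGo_max (threshold : Int) (l : List Int) (b c : Int) :
    lrbGo threshold l (max b c) = max b (lrbGo threshold l c) := by
  fun_induction lrbGo threshold l c with
  | case1 c => simp [lrbGo]
  | case2 x xs c h p ih =>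
    simp only [lrbGo, h, if_pos, max_assoc]
    exact ih
  | case3 x xs c h ih =>
    simp only [lrbGo, h, if_neg, not_false_iff]
    exact ih

-- the run decomposition of B's result
theorem lrbGo_decomp (threshold : Int) (l : List Int) :
    lrbGo threshold l 0 =
      max (lrbRun threshold l).1 (lrbGo threshold (lrbRun threshold l).2 0) := by
  cases l with
  | nil => simp [lrbRun, lrbGo]
  | cons x xs =>
    by_cases h : x < threshold
    · simp only [lrbRun, lrbGo, h, if_pos]
      have h0 : (0 : Int) ≤ (lrbRun threshold xs).1 + 1 := by
        have := lrbRun_nonneg threshold xs; omega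
      rw [show (max 0 ((lrbRun threshold xs).1 + 1)) = max ((lrbRun threshold xs).1 + 1) 0 from
        max_comm _ _]
      rw [lrbGo_max]
    · simp only [lrbRun, lrbGo, h, if_neg, not_false_iff]
      have := lrbGo_ge threshold xs (0 : Int)
      omega

-- invariant of A's fold: longest-so-far L absorbs the part already seen, current run c
-- extends into the leading run of the rest
theorem fold_invariant (threshold : Int) (l : List Int) :
    ∀ L c : Int, 0 ≤ c → c ≤ L →
    (l.foldl
      (fun (s : Int × Int) value =>
        if value < threshold then (max s.1 (s.2 + 1), s.2 + 1) else (s.1, 0))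
      (L, c)).1 =
    max L (max (c + (lrbRun threshold l).1) (lrbGo threshold (lrbRun threshold l).2 0)) := by
  induction l with
  | nil =>
    intro L c hc hcL
    simp only [List.foldl_nil, lrbRun, lrbGo]
    omega
  | cons x xs ih =>
    intro L c hc hcL
    by_cases h : x < threshold
    · simp only [List.foldl_cons, lrbRun, h, if_pos]
      rw [ih (max L (c + 1)) (c + 1) (by omega) (le_max_right _ _)]
      have hr := lrbRun_nonneg threshold xs
      have hg := lrbGo_ge threshold (lrbRun threshold xs).2 (0 : Int)
      omega
    · simp only [List.foldl_cons, lrbRun, h, if_neg, not_false_iff]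
      rw [ih L 0 (le_refl 0) (hc.trans hcL)]
      have hd := lrbGo_decomp threshold xs
      have hr := lrbRun_nonneg threshold xs
      have hg := lrbGo_ge threshold (lrbRun threshold xs).2 (0 : Int)
      -- goal: max L (max (0 + r) g) = max L (max (c + 0) (lrbGo (x::xs) 0))
      simp only [lrbGo, h, if_neg, not_false_iff]
      omega
  -- note: in the else branch lrbRun (x::xs) = (0, x::xs) and lrbGo (x::xs) 0 = lrbGo xs 0

-- ===== VERDICT (by name: the statement is the Claim_ definition above) =====
theorem longest_run_below_spec : Claim_equal_longest_run_below := by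
  intro series threshold _
  unfold Spec_longest_run_below longest_run_below longest_run_below_alt
  rw [fold_invariant threshold series 0 0 (le_refl 0) (le_refl 0)]
  have hd := lrbGo_decomp threshold series
  have hr := lrbRun_nonneg threshold series
  have hg := lrbGo_ge threshold (lrbRun threshold series).2 (0 : Int)
  omega
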